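/- GENERATED by mk_final_copies.py from the proof of the farm's unit `inverse_mdct.5` (farm:inverse_mdct.5.1: Proof.lean) as the
   re-elaboration sweep compiled it — do not edit. -/
import Asan.CheckWalk
import Vorbis.Spec.MdctUse
import Vorbis.Spec.Units.inverse_mdct_5
import Vorbis.Spec.Worked.inverse_mdct_5_Lemmas

/-
  Unit inverse_mdct.5 (0x109729 – 0x109824, lines 2757 – 2777): step 3 of inverse_mdct, the straight part —
  `ilog(n)`, imdct_step3_iter0_loop × 2, imdct_step3_inner_r_loop × 4, `l = 2` — from `At5` (`cut5`) to `At6` (`loop5`).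

  ONE LEMMA PER CALL, chained by `ReachVia.trans`: the assertion between two calls is `Between` (Lemmas.lean) at the return address
  of the call (`cut7` … `cut12`). Every lemma has the same shape: open the assertion, name the slots the stretch loads, walk to
  the call, the callee's precondition (`callee_shadow` + the interface lemma `pre_of_call` / `pre_of_call_r1` with the 32-bit
  arguments as numbers), then after the return: the callee's footprint as numbers, ONE `Mem.SameExcept` for the stretch
  (`u_same`) which carries the twenty slots of FRAME0 (`Slots.carry`), the three slots the segment itself stores by `u_frame`,
  and the accumulated footprint since `cut5` for the final `Body.carry`.
  (A single walk through the seven calls was killed after nine minutes: the context grows with every call.)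
-/

open X86 X86.User Asan Vorbis Vorbis.Spec
open Vorbis.Spec.inverse_mdct

set_option maxRecDepth 4000
set_option maxHeartbeats 16000000

namespace Vorbis.Spec.inverse_mdct_5

variable {Lay : Layout} {μ : Microarch} {u₀ : State} {others : List Obj} {frames : List (Nat × FrameLayout)} {len : Nat}
  {A : Arena} {stored room : Int} {ysz : Nat → Nat} {k c : Nat} {ue : State} {ret : Word} {v : State}

/-- **`ilog` and the first iter0 call** (`cut5` = 0x109729 … `cut7` = 0x10976a, lines 2757 – 2767): from the entry assertion `At5` to the return address
of `imdct_step3_iter0_loop(n >> 4, u, n2 − 1, −n8, A)`. `ilog(n) = ld + 1` (SH7: `log2_at`, `ilog_val`) goes into `d[rbp − 60H]`,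
`n2 − 1` into `d[rbp − 50H]`. -/
theorem step_cut7 (hLay : Lay.hi = 0x1000000) (hμ : UserX.MicroOK μ)
    (hcode : HasCodeNat Lay u₀ Vorbis.L.inverse_mdct.entry Vorbis.Code.code_inverse_mdct.nat Vorbis.L.inverse_mdct.size)
    (h_ilog : ∀ (others : List Obj) (frames : List (Nat × FrameLayout)),
      Calls Lay μ Vorbis.WayInv (Vorbis.conv u₀) Vorbis.L.ilog.entry (Vorbis.Spec.ilog.spec others frames))
    (h_iter0 : ∀ (others : List Obj) (frames : List (Nat × FrameLayout)) (len i0 koff : Nat),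
      Calls Lay μ Vorbis.WayInv (Vorbis.conv u₀) Vorbis.L.imdct_step3_iter0_loop.entry
        (Vorbis.Spec.imdct_step3_iter0_loop.spec others frames len i0 koff))
    (hat : At5 u₀ others frames len A stored room ysz k c ue ret v) :
    ReachVia Lay μ WayInv v (fun w =>
      Between u₀ others frames len A stored room ysz k c ue ret v Vorbis.L.inverse_mdct.cut7
      (Word.ofBV ((BitVec.ofNat 32 (n ue)).sshiftRight 4))
      (Word.ofBV (-BitVec.ofNat 32 (n ue / 8)))
      (UInt64.ofNat (tabA ue))
      (Word.ofBV (BitVec.ofNat 32 (n ue / 2) - 1#32))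
      (ue.reg .rdi) w) := by
  -- 1. the assertion's fields; the entry state's facts
  obtain ⟨hrip, hb, sBuf, sA, sS2, n4Slot⟩ := hat
  have he := hb.entry
  v_entry he
  have hp := hb.pre
  have hn := hp.isBlocksize
  have hf := hn.facts
  have hk13 := hp.ld.le
  obtain ⟨hbufoff, htmpoff⟩ := off_stack hp
  obtain ⟨hbufhi, htmphi⟩ := below_shadow hp
  have hbufdef : buf ue = (ue.reg .rdi).toNat := buf_def ue
  have hAw : (UInt64.ofNat (tabA ue)).toNat = tabA ue := tabA_word hp
  have hn2m1 : (BitVec.ofNat 32 (n ue / 2) - 1#32).toNat = n ue / 2 - 1 := v_n2m1 hn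
  -- 2. the present state under the walker's names (`c_rsp`, `c_rbp`: the walker clears `w_…` facts of the state it leaves)
  have w_rip := hrip
  have c_rsp := hb.rsp
  have c_rbp := hb.rbp
  have w_eq : Mem.EqOn Vorbis.L.textLo Vorbis.L.textHi u₀.mem v.mem := hb.code
  have hdf : v.flags .df = false := (show abiInv _ from hb.abi).1
  have hmx : v.mxcsr &&& 0x1F80 = 0x1F80 := (show abiInv _ from hb.abi).2
  have hsse := Vorbis.sseOK_of_abiInv hb.abi
  -- 3. the slots: FRAME0 as one structure, `q[rbp − 40H]` apart, and the one the first stretch loads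
  have hsl : Slots A ue ret v.mem :=
    ⟨hb.retSlot, hb.rbpSlot, hb.r15Slot, hb.r14Slot, hb.r13Slot, hb.r12Slot, hb.rbxSlot, hb.fSlot, hb.btSlot, hb.saveSlot,
      hb.vSlot, sBuf.uSlot, sBuf.nSlot, sBuf.uMidSlot, sA.n2Slot, sA.n2x4Slot, sA.n8Slot, sS2.n2x4m32Slot, sS2.n4x4Slot,
      n4Slot⟩
  have hsame0 := hb.same
  simp only [X86.User.Spec.footprint, vspec] at hsame0
  have q_a := sA.aSlot
  have q_n := hsl.nSlot
  -- 4. the walk to the call of ilog (0x10972e, line 2757)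
  have hc := h_ilog (A.newTempObj (2 * n ue) :: others) frames
  u_walk hcode [hμ.vendor] until [Vorbis.L.inverse_mdct.cut7] span [Vorbis.L.textLo, Vorbis.L.textHi] side (v_side)
  case call_inv => v_inv
  case pre_10972e =>
    refine ⟨callee_shadow hb ?_ w_rsp, List.mem_cons_of_mem _ hp.log2Obj⟩
    v_untouched
  -- after ilog: the value `ld + 1` (SH7 at the callee's entry memory), the frame
  obtain ⟨hun1, -, hval⟩ := w_post
  have hlog : Log2_4In s_10972e.mem := by
    apply log2_at hb
    simp only [X86.User.Spec.footprint, vspec]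
    rw [w_mem_10972e]
    u_same
  have hz := hval hlog
  rw [w_rdi_10972e, ilog_val hp.ld] at hz
  obtain ⟨z, w_rax⟩ : ∃ z, s_10972er.reg .rax = z := ⟨_, rfl⟩
  rw [w_rax] at hz
  have hz32 : (Word.part .w32 z).toNat = k + 1 := by
    rw [part32_toNat, hz]
    omega
  v_after_call w_rsp_10972e w_mem_10972e
  have q_a1 : s_10972er.mem.readLE (ue.reg .rsp - 72) 8 = tabA ue := by
    u_frame q_a
  have hstep1 : Mem.SameExcept
      [⟨(ue.reg .rsp).toNat - 368, (ue.reg .rsp).toNat - 184⟩, ⟨(ue.reg .rsp).toNat - 104, (ue.reg .rsp).toNat - 76⟩,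
       ⟨(ue.reg .rsp).toNat - 72, (ue.reg .rsp).toNat - 64⟩, ⟨buf ue, buf ue + 4 * n ue⟩,
       ⟨tmp A ue, tmp A ue + 2 * n ue⟩] v.mem s_10972er.mem := by
    u_same
  have hsl1 := hsl.carry he_room he_top hbufoff htmpoff hstep1
  have hacc1 : Mem.SameExcept
      [⟨(ue.reg .rsp).toNat - 368, (ue.reg .rsp).toNat⟩, ⟨buf ue, buf ue + 4 * n ue⟩, ⟨tmp A ue, tmp A ue + 2 * n ue⟩]
      v.mem s_10972er.mem := by
    u_same
  -- 5. the walk to the first iter0 call (0x109765, line 2767)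
  clear hc hsl q_n q_a hval hlog hun1 hstep1 w_same
  have q_n8 := hsl1.n8Slot
  have q_n2 := hsl1.n2Slot
  have q_u := hsl1.uSlot
  have hc := h_iter0 (A.newTempObj (2 * n ue) :: others) frames (n ue / 2) (n ue / 2 - 1 - n ue / 4 * 0) (n ue / 8)
  u_walk hcode [hμ.vendor] until [Vorbis.L.inverse_mdct.cut7] span [Vorbis.L.textLo, Vorbis.L.textHi] side (v_side)
  case call_inv => v_inv
  case pre_109765 =>
    have hsh : ShadowPre (A.newTempObj (2 * n ue) :: others) frames s_109765 := by
      refine callee_shadow hb ?_ w_rsp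
      v_untouched
    refine imdct_step3_iter0_loop.pre_of_call hn (j := 0) (by omega) hsh (buf_live hp) (tabA_live hp) ?_ ?_ ?_ ⟨?_, ?_, ?_⟩ ?_
    · rw [arg32_def, w_rdi, v_sar4 hn]
      omega
    · rw [w_rsi]
      exact hbufdef.symm
    · rw [arg32_def, w_rdx, toNat_ofBV32, v_n2m1 hn]
      omega
    · omega
    · omega
    · rw [arg32_def, w_rcx, toNat_ofBV32, v_negn8 hn]
      omega
    · rw [w_r8]
      exact hAw
  -- after the call: the callee's footprint as numbers, the slots outside `Slots`, then the frame
  v_after_call w_rsp_109765 w_mem_109765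
  simp only [w_rsi_109765, w_rdi_109765, v_sar4 hn, ← n_def] at w_same
  have q_a2 : s_109765r.mem.readLE (ue.reg .rsp - 72) 8 = tabA ue := by
    u_frame q_a1
  have p_ilog : s_109765.mem.readLE (ue.reg .rsp - 104) 4 = k + 1 := by
    rw [w_mem_109765]
    u_read
  rw [w_mem_109765] at p_ilog
  have q_ilog2 : s_109765r.mem.readLE (ue.reg .rsp - 104) 4 = k + 1 := by
    u_frame p_ilog
  have p_n2m1 : s_109765.mem.readLE (ue.reg .rsp - 88) 4 = n ue / 2 - 1 := by
    rw [w_mem_109765]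
    u_read
  rw [w_mem_109765] at p_n2m1
  have q_n2m12 : s_109765r.mem.readLE (ue.reg .rsp - 88) 4 = n ue / 2 - 1 := by
    u_frame p_n2m1
  have hstep2 : Mem.SameExcept
      [⟨(ue.reg .rsp).toNat - 368, (ue.reg .rsp).toNat - 184⟩, ⟨(ue.reg .rsp).toNat - 104, (ue.reg .rsp).toNat - 76⟩,
       ⟨(ue.reg .rsp).toNat - 72, (ue.reg .rsp).toNat - 64⟩, ⟨buf ue, buf ue + 4 * n ue⟩,
       ⟨tmp A ue, tmp A ue + 2 * n ue⟩] s_10972er.mem s_109765r.mem := by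
    u_same
  have hsl2 := hsl1.carry he_room he_top hbufoff htmpoff hstep2
  have hacc2 : Mem.SameExcept
      [⟨(ue.reg .rsp).toNat - 368, (ue.reg .rsp).toNat⟩, ⟨buf ue, buf ue + 4 * n ue⟩, ⟨tmp A ue, tmp A ue + 2 * n ue⟩]
      v.mem s_109765r.mem := by
    u_same
  refine ReachVia.done ⟨w_rip, hb, hacc2, hsl2, q_a2, q_ilog2, q_n2m12, w_eq, (show abiInv _ from w_inv), w_rsp, ?_,
    w_rbx, w_r12, w_r13, w_r14, w_r15⟩
  rw [w_kept .rbp rfl]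
  exact c_rbp

/-- **The second iter0 call** (`cut7` = 0x10976a … `cut8` = 0x109786, line 2768): `imdct_step3_iter0_loop(n >> 4, u, n2 − 1 − n4, −n8, A)`; the stretch
stores `A` back into `q[rbp − 40H]`. -/
theorem step_cut8 (hLay : Lay.hi = 0x1000000) (hμ : UserX.MicroOK μ)
    (hcode : HasCodeNat Lay u₀ Vorbis.L.inverse_mdct.entry Vorbis.Code.code_inverse_mdct.nat Vorbis.L.inverse_mdct.size)
    (h_iter0 : ∀ (others : List Obj) (frames : List (Nat × FrameLayout)) (len i0 koff : Nat),
      Calls Lay μ Vorbis.WayInv (Vorbis.conv u₀) Vorbis.L.imdct_step3_iter0_loop.entry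
        (Vorbis.Spec.imdct_step3_iter0_loop.spec others frames len i0 koff))
    {s : State}
    (hm : Between u₀ others frames len A stored room ysz k c ue ret v Vorbis.L.inverse_mdct.cut7
      (Word.ofBV ((BitVec.ofNat 32 (n ue)).sshiftRight 4))
      (Word.ofBV (-BitVec.ofNat 32 (n ue / 8)))
      (UInt64.ofNat (tabA ue))
      (Word.ofBV (BitVec.ofNat 32 (n ue / 2) - 1#32))
      (ue.reg .rdi) s) :
    ReachVia Lay μ WayInv s (fun w =>
      Between u₀ others frames len A stored room ysz k c ue ret v Vorbis.L.inverse_mdct.cut8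
      (Word.ofBV ((BitVec.ofNat 32 (n ue)).sshiftRight 4))
      (Word.ofBV (-BitVec.ofNat 32 (n ue / 8)))
      (UInt64.ofNat (tabA ue))
      (Word.ofBV (BitVec.ofNat 32 (n ue / 2) - 1#32))
      (ue.reg .rdi) w) := by
  obtain ⟨hrip, hb, hacc, hsl, q_a, q_ilog, q_n2m1, hcodeok, habi, c_rsp, c_rbp, c_rbx, c_r12, c_r13, c_r14, c_r15⟩ := hm
  have he := hb.entry
  v_entry he
  have hp := hb.pre
  have hn := hp.isBlocksize
  have hf := hn.facts
  obtain ⟨hbufoff, htmpoff⟩ := off_stack hp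
  obtain ⟨hbufhi, htmphi⟩ := below_shadow hp
  have hbufdef : buf ue = (ue.reg .rdi).toNat := buf_def ue
  have hAw : (UInt64.ofNat (tabA ue)).toNat = tabA ue := tabA_word hp
  -- the present state under the walker's names
  have w_rip := hrip
  have w_eq : Mem.EqOn Vorbis.L.textLo Vorbis.L.textHi u₀.mem s.mem := hcodeok
  have hdf : s.flags .df = false := habi.1
  have hmx : s.mxcsr &&& 0x1F80 = 0x1F80 := habi.2
  have hsse := Vorbis.sseOK_of_abiInv habi
  -- the slots the stretch loads
  have q_n4 := hsl.n4Slot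
  have hc := h_iter0 (A.newTempObj (2 * n ue) :: others) frames (n ue / 2) (n ue / 2 - 1 - n ue / 4 * 1) (n ue / 8)
  u_walk hcode [hμ.vendor] until [Vorbis.L.inverse_mdct.cut8] span [Vorbis.L.textLo, Vorbis.L.textHi] side (v_side)
  case call_inv => v_inv
  case pre_109781 =>
    -- the callee's precondition: the shadow layer, then `Mdct.Call` through the interface lemma
    have hsh : ShadowPre (A.newTempObj (2 * n ue) :: others) frames s_109781 := by
      refine callee_shadow hb ?_ w_rsp
      v_untouched
    refine imdct_step3_iter0_loop.pre_of_call hn (j := 1) (by omega) hsh (buf_live hp) (tabA_live hp) ?_ ?_ ?_ ⟨?_, ?_, ?_⟩ ?_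
    · rw [arg32_def, w_rdi, v_sar4 hn]
      omega
    · rw [w_rsi]
      exact hbufdef.symm
    · rw [arg32_def, w_rdx, toNat_ofBV32, v_i1 hn]
      omega
    · omega
    · omega
    · rw [arg32_def, w_rcx, toNat_ofBV32, v_negn8 hn]
      omega
    · rw [w_r8]
      exact hAw
  -- after the call: the callee's footprint as numbers, the three slots outside `Slots`, then the frame
  v_after_call w_rsp_109781 w_mem_109781
  simp only [w_rsi_109781, w_rdi_109781, v_sar4 hn, ← n_def] at w_same
  have p_a : s_109781.mem.readLE (ue.reg .rsp - 72) 8 = tabA ue := by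
    rw [w_mem_109781]
    u_read
  rw [w_mem_109781] at p_a
  have q_a' : s_109781r.mem.readLE (ue.reg .rsp - 72) 8 = tabA ue := by
    u_frame p_a
  have q_ilog' : s_109781r.mem.readLE (ue.reg .rsp - 104) 4 = k + 1 := by
    u_frame q_ilog
  have q_n2m1' : s_109781r.mem.readLE (ue.reg .rsp - 88) 4 = n ue / 2 - 1 := by
    u_frame q_n2m1
  have hstep : Mem.SameExcept
      [⟨(ue.reg .rsp).toNat - 368, (ue.reg .rsp).toNat - 184⟩, ⟨(ue.reg .rsp).toNat - 104, (ue.reg .rsp).toNat - 76⟩,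
       ⟨(ue.reg .rsp).toNat - 72, (ue.reg .rsp).toNat - 64⟩, ⟨buf ue, buf ue + 4 * n ue⟩,
       ⟨tmp A ue, tmp A ue + 2 * n ue⟩] s.mem s_109781r.mem := by
    u_same
  have hsl' := hsl.carry he_room he_top hbufoff htmpoff hstep
  have hacc' : Mem.SameExcept
      [⟨(ue.reg .rsp).toNat - 368, (ue.reg .rsp).toNat⟩, ⟨buf ue, buf ue + 4 * n ue⟩, ⟨tmp A ue, tmp A ue + 2 * n ue⟩]
      v.mem s_109781r.mem := by
    u_same
  refine ReachVia.done ⟨w_rip, hb, hacc', hsl', q_a', q_ilog', q_n2m1', w_eq, (show abiInv _ from w_inv), w_rsp, ?_, ?_, ?_, ?_, ?_, ?_⟩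
  · rw [w_kept .rbp rfl]
    exact c_rbp
  · first
      | exact w_rbx
      | (rw [w_kept .rbx rfl]; exact c_rbx)
  · first
      | exact w_r12
      | (rw [w_kept .r12 rfl]; exact c_r12)
  · first
      | exact w_r13
      | (rw [w_kept .r13 rfl]; exact c_r13)
  · first
      | exact w_r14
      | (rw [w_kept .r14 rfl]; exact c_r14)
  · first
      | exact w_r15
      | (rw [w_kept .r15 rfl]; exact c_r15)

/-- **The first r_loop call** (`cut8` = 0x109786 … `cut9` = 0x1097ad, line 2771): `imdct_step3_inner_r_loop(n >> 5, u, n2 − 1, −(n >> 4), A, 16)`. -/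
theorem step_cut9 (hLay : Lay.hi = 0x1000000) (hμ : UserX.MicroOK μ)
    (hcode : HasCodeNat Lay u₀ Vorbis.L.inverse_mdct.entry Vorbis.Code.code_inverse_mdct.nat Vorbis.L.inverse_mdct.size)
    (h_rloop : ∀ (others : List Obj) (frames : List (Nat × FrameLayout)) (len i0 koff k1 : Nat),
      Calls Lay μ Vorbis.WayInv (Vorbis.conv u₀) Vorbis.L.imdct_step3_inner_r_loop.entry
        (Vorbis.Spec.imdct_step3_inner_r_loop.spec others frames len i0 koff k1))
    {s : State}
    (hm : Between u₀ others frames len A stored room ysz k c ue ret v Vorbis.L.inverse_mdct.cut8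
      (Word.ofBV ((BitVec.ofNat 32 (n ue)).sshiftRight 4))
      (Word.ofBV (-BitVec.ofNat 32 (n ue / 8)))
      (UInt64.ofNat (tabA ue))
      (Word.ofBV (BitVec.ofNat 32 (n ue / 2) - 1#32))
      (ue.reg .rdi) s) :
    ReachVia Lay μ WayInv s (fun w =>
      Between u₀ others frames len A stored room ysz k c ue ret v Vorbis.L.inverse_mdct.cut9
      (Word.ofBV (-(BitVec.ofNat 32 (n ue)).sshiftRight 4))
      (ue.reg .rdi)
      (Word.ofBV ((BitVec.ofNat 32 (n ue)).sshiftRight 5))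
      (Word.ofBV (BitVec.ofNat 32 (n ue / 2) - 1#32))
      (ue.reg .rdi) w) := by
  obtain ⟨hrip, hb, hacc, hsl, q_a, q_ilog, q_n2m1, hcodeok, habi, c_rsp, c_rbp, c_rbx, c_r12, c_r13, c_r14, c_r15⟩ := hm
  have he := hb.entry
  v_entry he
  have hp := hb.pre
  have hn := hp.isBlocksize
  have hf := hn.facts
  obtain ⟨hbufoff, htmpoff⟩ := off_stack hp
  obtain ⟨hbufhi, htmphi⟩ := below_shadow hp
  have hbufdef : buf ue = (ue.reg .rdi).toNat := buf_def ue
  have hAw : (UInt64.ofNat (tabA ue)).toNat = tabA ue := tabA_word hp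
  -- the present state under the walker's names
  have w_rip := hrip
  have w_eq : Mem.EqOn Vorbis.L.textLo Vorbis.L.textHi u₀.mem s.mem := hcodeok
  have hdf : s.flags .df = false := habi.1
  have hmx : s.mxcsr &&& 0x1F80 = 0x1F80 := habi.2
  have hsse := Vorbis.sseOK_of_abiInv habi
  -- the slots the stretch loads
  have q_n := hsl.nSlot
  have hc := h_rloop (A.newTempObj (2 * n ue) :: others) frames (n ue / 2) (n ue / 2 - 1 - n ue / 8 * 0) (n ue / 16) 16
  u_walk hcode [hμ.vendor] until [Vorbis.L.inverse_mdct.cut9] span [Vorbis.L.textLo, Vorbis.L.textHi] side (v_side)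
  case call_inv => v_inv
  case pre_1097a8 =>
    -- the callee's precondition: the shadow layer, then `Mdct.Call` through the interface lemma
    have hsh : ShadowPre (A.newTempObj (2 * n ue) :: others) frames s_1097a8 := by
      refine callee_shadow hb ?_ w_rsp
      v_untouched
    refine imdct_step3_inner_r_loop.pre_of_call_r1 hn (j := 0) (by omega) hsh (buf_live hp) (tabA_live hp) ?_ ?_ ?_ ⟨?_, ?_, ?_⟩ ?_ ?_
    · rw [arg32_def, w_rdi, v_sar5 hn]
      omega
    · rw [w_rsi]
      exact hbufdef.symm
    · rw [arg32_def, w_rdx, toNat_ofBV32, v_n2m1 hn]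
      omega
    · omega
    · omega
    · rw [arg32_def, w_rcx, toNat_ofBV32, v_negn16 hn]
      omega
    · rw [w_r8]
      exact hAw
    · rw [arg32_def, w_r9]
      rfl
  -- after the call: the callee's footprint as numbers, the three slots outside `Slots`, then the frame
  v_after_call w_rsp_1097a8 w_mem_1097a8
  simp only [w_rsi_1097a8, w_rdi_1097a8, v_sar5 hn, ← n_def] at w_same
  have q_a' : s_1097a8r.mem.readLE (ue.reg .rsp - 72) 8 = tabA ue := by
    u_frame q_a
  have q_ilog' : s_1097a8r.mem.readLE (ue.reg .rsp - 104) 4 = k + 1 := by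
    u_frame q_ilog
  have q_n2m1' : s_1097a8r.mem.readLE (ue.reg .rsp - 88) 4 = n ue / 2 - 1 := by
    u_frame q_n2m1
  have hstep : Mem.SameExcept
      [⟨(ue.reg .rsp).toNat - 368, (ue.reg .rsp).toNat - 184⟩, ⟨(ue.reg .rsp).toNat - 104, (ue.reg .rsp).toNat - 76⟩,
       ⟨(ue.reg .rsp).toNat - 72, (ue.reg .rsp).toNat - 64⟩, ⟨buf ue, buf ue + 4 * n ue⟩,
       ⟨tmp A ue, tmp A ue + 2 * n ue⟩] s.mem s_1097a8r.mem := by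
    u_same
  have hsl' := hsl.carry he_room he_top hbufoff htmpoff hstep
  have hacc' : Mem.SameExcept
      [⟨(ue.reg .rsp).toNat - 368, (ue.reg .rsp).toNat⟩, ⟨buf ue, buf ue + 4 * n ue⟩, ⟨tmp A ue, tmp A ue + 2 * n ue⟩]
      v.mem s_1097a8r.mem := by
    u_same
  refine ReachVia.done ⟨w_rip, hb, hacc', hsl', q_a', q_ilog', q_n2m1', w_eq, (show abiInv _ from w_inv), w_rsp, ?_, ?_, ?_, ?_, ?_, ?_⟩
  · rw [w_kept .rbp rfl]
    exact c_rbp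
  · first
      | exact w_rbx
      | (rw [w_kept .rbx rfl]; exact c_rbx)
  · first
      | exact w_r12
      | (rw [w_kept .r12 rfl]; exact c_r12)
  · first
      | exact w_r13
      | (rw [w_kept .r13 rfl]; exact c_r13)
  · first
      | exact w_r14
      | (rw [w_kept .r14 rfl]; exact c_r14)
  · first
      | exact w_r15
      | (rw [w_kept .r15 rfl]; exact c_r15)

/-- **The second r_loop call** (`cut9` = 0x1097ad … `cut10` = 0x1097d4, line 2772): `d0 = n2 − 1 − n8`. -/
theorem step_cut10 (hLay : Lay.hi = 0x1000000) (hμ : UserX.MicroOK μ)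
    (hcode : HasCodeNat Lay u₀ Vorbis.L.inverse_mdct.entry Vorbis.Code.code_inverse_mdct.nat Vorbis.L.inverse_mdct.size)
    (h_rloop : ∀ (others : List Obj) (frames : List (Nat × FrameLayout)) (len i0 koff k1 : Nat),
      Calls Lay μ Vorbis.WayInv (Vorbis.conv u₀) Vorbis.L.imdct_step3_inner_r_loop.entry
        (Vorbis.Spec.imdct_step3_inner_r_loop.spec others frames len i0 koff k1))
    {s : State}
    (hm : Between u₀ others frames len A stored room ysz k c ue ret v Vorbis.L.inverse_mdct.cut9
      (Word.ofBV (-(BitVec.ofNat 32 (n ue)).sshiftRight 4))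
      (ue.reg .rdi)
      (Word.ofBV ((BitVec.ofNat 32 (n ue)).sshiftRight 5))
      (Word.ofBV (BitVec.ofNat 32 (n ue / 2) - 1#32))
      (ue.reg .rdi) s) :
    ReachVia Lay μ WayInv s (fun w =>
      Between u₀ others frames len A stored room ysz k c ue ret v Vorbis.L.inverse_mdct.cut10
      (Word.ofBV (-(BitVec.ofNat 32 (n ue)).sshiftRight 4))
      (ue.reg .rdi)
      (Word.ofBV ((BitVec.ofNat 32 (n ue)).sshiftRight 5))
      (Word.ofBV (BitVec.ofNat 32 (n ue / 8)))
      (Word.ofBV (BitVec.ofNat 32 (n ue / 2) - 1#32)) w) := by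
  obtain ⟨hrip, hb, hacc, hsl, q_a, q_ilog, q_n2m1, hcodeok, habi, c_rsp, c_rbp, c_rbx, c_r12, c_r13, c_r14, c_r15⟩ := hm
  have he := hb.entry
  v_entry he
  have hp := hb.pre
  have hn := hp.isBlocksize
  have hf := hn.facts
  obtain ⟨hbufoff, htmpoff⟩ := off_stack hp
  obtain ⟨hbufhi, htmphi⟩ := below_shadow hp
  have hbufdef : buf ue = (ue.reg .rdi).toNat := buf_def ue
  have hAw : (UInt64.ofNat (tabA ue)).toNat = tabA ue := tabA_word hp
  -- the present state under the walker's names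
  have w_rip := hrip
  have w_eq : Mem.EqOn Vorbis.L.textLo Vorbis.L.textHi u₀.mem s.mem := hcodeok
  have hdf : s.flags .df = false := habi.1
  have hmx : s.mxcsr &&& 0x1F80 = 0x1F80 := habi.2
  have hsse := Vorbis.sseOK_of_abiInv habi
  -- the slots the stretch loads
  have q_n8 := hsl.n8Slot
  have hc := h_rloop (A.newTempObj (2 * n ue) :: others) frames (n ue / 2) (n ue / 2 - 1 - n ue / 8 * 1) (n ue / 16) 16
  u_walk hcode [hμ.vendor] until [Vorbis.L.inverse_mdct.cut10] span [Vorbis.L.textLo, Vorbis.L.textHi] side (v_side)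
  case call_inv => v_inv
  case pre_1097cf =>
    -- the callee's precondition: the shadow layer, then `Mdct.Call` through the interface lemma
    have hsh : ShadowPre (A.newTempObj (2 * n ue) :: others) frames s_1097cf := by
      refine callee_shadow hb ?_ w_rsp
      v_untouched
    refine imdct_step3_inner_r_loop.pre_of_call_r1 hn (j := 1) (by omega) hsh (buf_live hp) (tabA_live hp) ?_ ?_ ?_ ⟨?_, ?_, ?_⟩ ?_ ?_
    · rw [arg32_def, w_rdi, v_sar5 hn]
      omega
    · rw [w_rsi]
      exact hbufdef.symm
    · rw [arg32_def, w_rdx, toNat_ofBV32, v_d1 hn]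
      omega
    · omega
    · omega
    · rw [arg32_def, w_rcx, toNat_ofBV32, v_negn16 hn]
      omega
    · rw [w_r8]
      exact hAw
    · rw [arg32_def, w_r9]
      rfl
  -- after the call: the callee's footprint as numbers, the three slots outside `Slots`, then the frame
  v_after_call w_rsp_1097cf w_mem_1097cf
  simp only [w_rsi_1097cf, w_rdi_1097cf, v_sar5 hn, ← n_def] at w_same
  have q_a' : s_1097cfr.mem.readLE (ue.reg .rsp - 72) 8 = tabA ue := by
    u_frame q_a
  have q_ilog' : s_1097cfr.mem.readLE (ue.reg .rsp - 104) 4 = k + 1 := by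
    u_frame q_ilog
  have q_n2m1' : s_1097cfr.mem.readLE (ue.reg .rsp - 88) 4 = n ue / 2 - 1 := by
    u_frame q_n2m1
  have hstep : Mem.SameExcept
      [⟨(ue.reg .rsp).toNat - 368, (ue.reg .rsp).toNat - 184⟩, ⟨(ue.reg .rsp).toNat - 104, (ue.reg .rsp).toNat - 76⟩,
       ⟨(ue.reg .rsp).toNat - 72, (ue.reg .rsp).toNat - 64⟩, ⟨buf ue, buf ue + 4 * n ue⟩,
       ⟨tmp A ue, tmp A ue + 2 * n ue⟩] s.mem s_1097cfr.mem := by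
    u_same
  have hsl' := hsl.carry he_room he_top hbufoff htmpoff hstep
  have hacc' : Mem.SameExcept
      [⟨(ue.reg .rsp).toNat - 368, (ue.reg .rsp).toNat⟩, ⟨buf ue, buf ue + 4 * n ue⟩, ⟨tmp A ue, tmp A ue + 2 * n ue⟩]
      v.mem s_1097cfr.mem := by
    u_same
  refine ReachVia.done ⟨w_rip, hb, hacc', hsl', q_a', q_ilog', q_n2m1', w_eq, (show abiInv _ from w_inv), w_rsp, ?_, ?_, ?_, ?_, ?_, ?_⟩
  · rw [w_kept .rbp rfl]
    exact c_rbp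
  · first
      | exact w_rbx
      | (rw [w_kept .rbx rfl]; exact c_rbx)
  · first
      | exact w_r12
      | (rw [w_kept .r12 rfl]; exact c_r12)
  · first
      | exact w_r13
      | (rw [w_kept .r13 rfl]; exact c_r13)
  · first
      | exact w_r14
      | (rw [w_kept .r14 rfl]; exact c_r14)
  · first
      | exact w_r15
      | (rw [w_kept .r15 rfl]; exact c_r15)

/-- **The third r_loop call** (`cut10` = 0x1097d4 … `cut11` = 0x1097f4, line 2773): `d0 = n2 − 1 − 2·n8` (`lea eax, [r14 + r14]`). -/
theorem step_cut11 (hLay : Lay.hi = 0x1000000) (hμ : UserX.MicroOK μ)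
    (hcode : HasCodeNat Lay u₀ Vorbis.L.inverse_mdct.entry Vorbis.Code.code_inverse_mdct.nat Vorbis.L.inverse_mdct.size)
    (h_rloop : ∀ (others : List Obj) (frames : List (Nat × FrameLayout)) (len i0 koff k1 : Nat),
      Calls Lay μ Vorbis.WayInv (Vorbis.conv u₀) Vorbis.L.imdct_step3_inner_r_loop.entry
        (Vorbis.Spec.imdct_step3_inner_r_loop.spec others frames len i0 koff k1))
    {s : State}
    (hm : Between u₀ others frames len A stored room ysz k c ue ret v Vorbis.L.inverse_mdct.cut10
      (Word.ofBV (-(BitVec.ofNat 32 (n ue)).sshiftRight 4))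
      (ue.reg .rdi)
      (Word.ofBV ((BitVec.ofNat 32 (n ue)).sshiftRight 5))
      (Word.ofBV (BitVec.ofNat 32 (n ue / 8)))
      (Word.ofBV (BitVec.ofNat 32 (n ue / 2) - 1#32)) s) :
    ReachVia Lay μ WayInv s (fun w =>
      Between u₀ others frames len A stored room ysz k c ue ret v Vorbis.L.inverse_mdct.cut11
      (Word.ofBV (-(BitVec.ofNat 32 (n ue)).sshiftRight 4))
      (ue.reg .rdi)
      (Word.ofBV ((BitVec.ofNat 32 (n ue)).sshiftRight 5))
      (Word.ofBV (BitVec.ofNat 32 (n ue / 8)))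
      (Word.ofBV (BitVec.ofNat 32 (n ue / 2) - 1#32)) w) := by
  obtain ⟨hrip, hb, hacc, hsl, q_a, q_ilog, q_n2m1, hcodeok, habi, c_rsp, c_rbp, c_rbx, c_r12, c_r13, c_r14, c_r15⟩ := hm
  have he := hb.entry
  v_entry he
  have hp := hb.pre
  have hn := hp.isBlocksize
  have hf := hn.facts
  obtain ⟨hbufoff, htmpoff⟩ := off_stack hp
  obtain ⟨hbufhi, htmphi⟩ := below_shadow hp
  have hbufdef : buf ue = (ue.reg .rdi).toNat := buf_def ue
  have hAw : (UInt64.ofNat (tabA ue)).toNat = tabA ue := tabA_word hp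
  -- the present state under the walker's names
  have w_rip := hrip
  have w_eq : Mem.EqOn Vorbis.L.textLo Vorbis.L.textHi u₀.mem s.mem := hcodeok
  have hdf : s.flags .df = false := habi.1
  have hmx : s.mxcsr &&& 0x1F80 = 0x1F80 := habi.2
  have hsse := Vorbis.sseOK_of_abiInv habi
  -- the slots the stretch loads
  have hc := h_rloop (A.newTempObj (2 * n ue) :: others) frames (n ue / 2) (n ue / 2 - 1 - n ue / 8 * 2) (n ue / 16) 16
  u_walk hcode [hμ.vendor] until [Vorbis.L.inverse_mdct.cut11] span [Vorbis.L.textLo, Vorbis.L.textHi] side (v_side)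
  case call_inv => v_inv
  case pre_1097ef =>
    -- the callee's precondition: the shadow layer, then `Mdct.Call` through the interface lemma
    have hsh : ShadowPre (A.newTempObj (2 * n ue) :: others) frames s_1097ef := by
      refine callee_shadow hb ?_ w_rsp
      v_untouched
    refine imdct_step3_inner_r_loop.pre_of_call_r1 hn (j := 2) (by omega) hsh (buf_live hp) (tabA_live hp) ?_ ?_ ?_ ⟨?_, ?_, ?_⟩ ?_ ?_
    · rw [arg32_def, w_rdi, v_sar5 hn]
      omega
    · rw [w_rsi]
      exact hbufdef.symm
    · rw [arg32_def, w_rdx, toNat_ofBV32, v_d2 hn]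
      omega
    · omega
    · omega
    · rw [arg32_def, w_rcx, toNat_ofBV32, v_negn16 hn]
      omega
    · rw [w_r8]
      exact hAw
    · rw [arg32_def, w_r9]
      rfl
  -- after the call: the callee's footprint as numbers, the three slots outside `Slots`, then the frame
  v_after_call w_rsp_1097ef w_mem_1097ef
  simp only [w_rsi_1097ef, w_rdi_1097ef, v_sar5 hn, ← n_def] at w_same
  have q_a' : s_1097efr.mem.readLE (ue.reg .rsp - 72) 8 = tabA ue := by
    u_frame q_a
  have q_ilog' : s_1097efr.mem.readLE (ue.reg .rsp - 104) 4 = k + 1 := by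
    u_frame q_ilog
  have q_n2m1' : s_1097efr.mem.readLE (ue.reg .rsp - 88) 4 = n ue / 2 - 1 := by
    u_frame q_n2m1
  have hstep : Mem.SameExcept
      [⟨(ue.reg .rsp).toNat - 368, (ue.reg .rsp).toNat - 184⟩, ⟨(ue.reg .rsp).toNat - 104, (ue.reg .rsp).toNat - 76⟩,
       ⟨(ue.reg .rsp).toNat - 72, (ue.reg .rsp).toNat - 64⟩, ⟨buf ue, buf ue + 4 * n ue⟩,
       ⟨tmp A ue, tmp A ue + 2 * n ue⟩] s.mem s_1097efr.mem := by
    u_same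
  have hsl' := hsl.carry he_room he_top hbufoff htmpoff hstep
  have hacc' : Mem.SameExcept
      [⟨(ue.reg .rsp).toNat - 368, (ue.reg .rsp).toNat⟩, ⟨buf ue, buf ue + 4 * n ue⟩, ⟨tmp A ue, tmp A ue + 2 * n ue⟩]
      v.mem s_1097efr.mem := by
    u_same
  refine ReachVia.done ⟨w_rip, hb, hacc', hsl', q_a', q_ilog', q_n2m1', w_eq, (show abiInv _ from w_inv), w_rsp, ?_, ?_, ?_, ?_, ?_, ?_⟩
  · rw [w_kept .rbp rfl]
    exact c_rbp
  · first
      | exact w_rbx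
      | (rw [w_kept .rbx rfl]; exact c_rbx)
  · first
      | exact w_r12
      | (rw [w_kept .r12 rfl]; exact c_r12)
  · first
      | exact w_r13
      | (rw [w_kept .r13 rfl]; exact c_r13)
  · first
      | exact w_r14
      | (rw [w_kept .r14 rfl]; exact c_r14)
  · first
      | exact w_r15
      | (rw [w_kept .r15 rfl]; exact c_r15)

/-- **The fourth r_loop call** (`cut11` = 0x1097f4 … `cut12` = 0x10981a, line 2774): `d0 = n2 − 1 − 3·n8` (`lea edx, [r15 + r14]`, r14d = n8 − 4·n8). -/
theorem step_cut12 (hLay : Lay.hi = 0x1000000) (hμ : UserX.MicroOK μ)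
    (hcode : HasCodeNat Lay u₀ Vorbis.L.inverse_mdct.entry Vorbis.Code.code_inverse_mdct.nat Vorbis.L.inverse_mdct.size)
    (h_rloop : ∀ (others : List Obj) (frames : List (Nat × FrameLayout)) (len i0 koff k1 : Nat),
      Calls Lay μ Vorbis.WayInv (Vorbis.conv u₀) Vorbis.L.imdct_step3_inner_r_loop.entry
        (Vorbis.Spec.imdct_step3_inner_r_loop.spec others frames len i0 koff k1))
    {s : State}
    (hm : Between u₀ others frames len A stored room ysz k c ue ret v Vorbis.L.inverse_mdct.cut11
      (Word.ofBV (-(BitVec.ofNat 32 (n ue)).sshiftRight 4))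
      (ue.reg .rdi)
      (Word.ofBV ((BitVec.ofNat 32 (n ue)).sshiftRight 5))
      (Word.ofBV (BitVec.ofNat 32 (n ue / 8)))
      (Word.ofBV (BitVec.ofNat 32 (n ue / 2) - 1#32)) s) :
    ReachVia Lay μ WayInv s (fun w =>
      Between u₀ others frames len A stored room ysz k c ue ret v Vorbis.L.inverse_mdct.cut12
      (Word.ofBV (-(BitVec.ofNat 32 (n ue)).sshiftRight 4))
      (ue.reg .rdi)
      (Word.ofBV ((BitVec.ofNat 32 (n ue)).sshiftRight 5))
      (Word.ofBV (BitVec.ofNat 32 (n ue / 8) -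
        BitVec.setWidth 32 (Word.ofBV (BitVec.ofNat 32 (n ue / 8)) * 4).toBitVec))
      (Word.ofBV (BitVec.ofNat 32 (n ue / 2) - 1#32)) w) := by
  obtain ⟨hrip, hb, hacc, hsl, q_a, q_ilog, q_n2m1, hcodeok, habi, c_rsp, c_rbp, c_rbx, c_r12, c_r13, c_r14, c_r15⟩ := hm
  have he := hb.entry
  v_entry he
  have hp := hb.pre
  have hn := hp.isBlocksize
  have hf := hn.facts
  obtain ⟨hbufoff, htmpoff⟩ := off_stack hp
  obtain ⟨hbufhi, htmphi⟩ := below_shadow hp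
  have hbufdef : buf ue = (ue.reg .rdi).toNat := buf_def ue
  have hAw : (UInt64.ofNat (tabA ue)).toNat = tabA ue := tabA_word hp
  -- the present state under the walker's names
  have w_rip := hrip
  have w_eq : Mem.EqOn Vorbis.L.textLo Vorbis.L.textHi u₀.mem s.mem := hcodeok
  have hdf : s.flags .df = false := habi.1
  have hmx : s.mxcsr &&& 0x1F80 = 0x1F80 := habi.2
  have hsse := Vorbis.sseOK_of_abiInv habi
  -- the slots the stretch loads
  have hc := h_rloop (A.newTempObj (2 * n ue) :: others) frames (n ue / 2) (n ue / 2 - 1 - n ue / 8 * 3) (n ue / 16) 16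
  u_walk hcode [hμ.vendor] until [Vorbis.L.inverse_mdct.cut12] span [Vorbis.L.textLo, Vorbis.L.textHi] side (v_side)
  case call_inv => v_inv
  case pre_109815 =>
    -- the callee's precondition: the shadow layer, then `Mdct.Call` through the interface lemma
    have hsh : ShadowPre (A.newTempObj (2 * n ue) :: others) frames s_109815 := by
      refine callee_shadow hb ?_ w_rsp
      v_untouched
    refine imdct_step3_inner_r_loop.pre_of_call_r1 hn (j := 3) (by omega) hsh (buf_live hp) (tabA_live hp) ?_ ?_ ?_ ⟨?_, ?_, ?_⟩ ?_ ?_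
    · rw [arg32_def, w_rdi, v_sar5 hn]
      omega
    · rw [w_rsi]
      exact hbufdef.symm
    · rw [arg32_def, w_rdx, toNat_ofBV32, v_d3 hn]
      omega
    · omega
    · omega
    · rw [arg32_def, w_rcx, toNat_ofBV32, v_negn16 hn]
      omega
    · rw [w_r8]
      exact hAw
    · rw [arg32_def, w_r9]
      rfl
  -- after the call: the callee's footprint as numbers, the three slots outside `Slots`, then the frame
  v_after_call w_rsp_109815 w_mem_109815
  simp only [w_rsi_109815, w_rdi_109815, v_sar5 hn, ← n_def] at w_same
  have q_a' : s_109815r.mem.readLE (ue.reg .rsp - 72) 8 = tabA ue := by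
    u_frame q_a
  have q_ilog' : s_109815r.mem.readLE (ue.reg .rsp - 104) 4 = k + 1 := by
    u_frame q_ilog
  have q_n2m1' : s_109815r.mem.readLE (ue.reg .rsp - 88) 4 = n ue / 2 - 1 := by
    u_frame q_n2m1
  have hstep : Mem.SameExcept
      [⟨(ue.reg .rsp).toNat - 368, (ue.reg .rsp).toNat - 184⟩, ⟨(ue.reg .rsp).toNat - 104, (ue.reg .rsp).toNat - 76⟩,
       ⟨(ue.reg .rsp).toNat - 72, (ue.reg .rsp).toNat - 64⟩, ⟨buf ue, buf ue + 4 * n ue⟩,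
       ⟨tmp A ue, tmp A ue + 2 * n ue⟩] s.mem s_109815r.mem := by
    u_same
  have hsl' := hsl.carry he_room he_top hbufoff htmpoff hstep
  have hacc' : Mem.SameExcept
      [⟨(ue.reg .rsp).toNat - 368, (ue.reg .rsp).toNat⟩, ⟨buf ue, buf ue + 4 * n ue⟩, ⟨tmp A ue, tmp A ue + 2 * n ue⟩]
      v.mem s_109815r.mem := by
    u_same
  refine ReachVia.done ⟨w_rip, hb, hacc', hsl', q_a', q_ilog', q_n2m1', w_eq, (show abiInv _ from w_inv), w_rsp, ?_, ?_, ?_, ?_, ?_, ?_⟩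
  · rw [w_kept .rbp rfl]
    exact c_rbp
  · first
      | exact w_rbx
      | (rw [w_kept .rbx rfl]; exact c_rbx)
  · first
      | exact w_r12
      | (rw [w_kept .r12 rfl]; exact c_r12)
  · first
      | exact w_r13
      | (rw [w_kept .r13 rfl]; exact c_r13)
  · first
      | exact w_r14
      | (rw [w_kept .r14 rfl]; exact c_r14)
  · first
      | exact w_r15
      | (rw [w_kept .r15 rfl]; exact c_r15)

/-- **`l = 2`** (`cut12` = 0x10981a … `loop5` = 0x10986b, lines 2776 – 2777): `mov r15d, 2`, `n >> 5` into `d[rbp − 48H]`, the jump to the head of the first `l`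
loop; the exit assertion `At6` through `Body.carry`. -/
theorem step_loop5 (hLay : Lay.hi = 0x1000000) (hμ : UserX.MicroOK μ)
    (hcode : HasCodeNat Lay u₀ Vorbis.L.inverse_mdct.entry Vorbis.Code.code_inverse_mdct.nat Vorbis.L.inverse_mdct.size)
    {s : State}
    (hm : Between u₀ others frames len A stored room ysz k c ue ret v Vorbis.L.inverse_mdct.cut12
      (Word.ofBV (-(BitVec.ofNat 32 (n ue)).sshiftRight 4))
      (ue.reg .rdi)
      (Word.ofBV ((BitVec.ofNat 32 (n ue)).sshiftRight 5))
      (Word.ofBV (BitVec.ofNat 32 (n ue / 8) -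
        BitVec.setWidth 32 (Word.ofBV (BitVec.ofNat 32 (n ue / 8)) * 4).toBitVec))
      (Word.ofBV (BitVec.ofNat 32 (n ue / 2) - 1#32)) s) :
    ReachVia Lay μ WayInv s (fun w => At6 u₀ others frames len A stored room ysz k c ue ret w) := by
  obtain ⟨hrip, hb, hacc, hsl, q_a, q_ilog, q_n2m1, hcodeok, habi, c_rsp, c_rbp, c_rbx, c_r12, c_r13, c_r14, c_r15⟩ := hm
  have he := hb.entry
  v_entry he
  have hp := hb.pre
  have hn := hp.isBlocksize
  have hf := hn.facts
  obtain ⟨hbufoff, htmpoff⟩ := off_stack hp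
  obtain ⟨hbufhi, htmphi⟩ := below_shadow hp
  have hbufdef : buf ue = (ue.reg .rdi).toNat := buf_def ue
  have hAw : (UInt64.ofNat (tabA ue)).toNat = tabA ue := tabA_word hp
  -- the present state under the walker's names
  have w_rip := hrip
  have w_eq : Mem.EqOn Vorbis.L.textLo Vorbis.L.textHi u₀.mem s.mem := hcodeok
  have hdf : s.flags .df = false := habi.1
  have hmx : s.mxcsr &&& 0x1F80 = 0x1F80 := habi.2
  have hsse := Vorbis.sseOK_of_abiInv habi
  have hn32 : ((BitVec.ofNat 32 (n ue)).sshiftRight 5).toNat = n ue / 32 := by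
    rw [sar_toNat (n ue) 5 (by omega)]
  u_walk hcode [hμ.vendor] until [Vorbis.L.inverse_mdct.loop5] span [Vorbis.L.textLo, Vorbis.L.textHi] side (v_side)
  -- the exit at `loop5`: the frame over the one store, then `Body.carry` from the segment's entry
  have hstep : Mem.SameExcept
      [⟨(ue.reg .rsp).toNat - 368, (ue.reg .rsp).toNat - 184⟩, ⟨(ue.reg .rsp).toNat - 104, (ue.reg .rsp).toNat - 76⟩,
       ⟨(ue.reg .rsp).toNat - 72, (ue.reg .rsp).toNat - 64⟩, ⟨buf ue, buf ue + 4 * n ue⟩,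
       ⟨tmp A ue, tmp A ue + 2 * n ue⟩] s.mem s_109824.mem := by
    rw [w_mem]
    u_same
  have hsl' := hsl.carry he_room he_top hbufoff htmpoff hstep
  have hacc' : Mem.SameExcept
      [⟨(ue.reg .rsp).toNat - 368, (ue.reg .rsp).toNat⟩, ⟨buf ue, buf ue + 4 * n ue⟩, ⟨tmp A ue, tmp A ue + 2 * n ue⟩]
      v.mem s_109824.mem := by
    rw [w_mem]
    u_same
  have q_a' : s_109824.mem.readLE (ue.reg .rsp - 72) 8 = tabA ue := by
    u_frame q_a
  have q_ilog' : s_109824.mem.readLE (ue.reg .rsp - 104) 4 = k + 1 := by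
    u_frame q_ilog
  have q_n2m1' : s_109824.mem.readLE (ue.reg .rsp - 88) 4 = n ue / 2 - 1 := by
    u_frame q_n2m1
  have q_n32 : s_109824.mem.readLE (ue.reg .rsp - 80) 4 = n ue / 32 := by
    rw [w_mem]
    u_read
  have hrbp : s_109824.reg .rbp = ue.reg .rsp - 8 := by
    rw [w_kept .rbp rfl]
    exact c_rbp
  have hrsp : s_109824.reg .rsp = ue.reg .rsp - 184 := by
    rw [w_kept .rsp rfl]
    exact c_rsp
  have habi' : abiInv s_109824 := by
    v_inv
  refine ReachVia.done ⟨w_rip, ?_, ⟨hsl'.uSlot, hsl'.nSlot, hsl'.uMidSlot⟩, ⟨q_a', hsl'.n2Slot, hsl'.n2x4Slot, hsl'.n8Slot⟩,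
    ⟨hsl'.n2x4m32Slot, hsl'.n4x4Slot⟩, ⟨q_ilog', q_n2m1'⟩, hsl'.n4Slot, q_n32, ?_⟩
  · exact Body.carry hb hacc' w_eq habi' hrbp hrsp hsl'.retSlot hsl'.rbpSlot hsl'.r15Slot hsl'.r14Slot hsl'.r13Slot
      hsl'.r12Slot hsl'.rbxSlot hsl'.fSlot hsl'.btSlot hsl'.saveSlot hsl'.vSlot
  · rw [w_r15]
    rfl

end Vorbis.Spec.inverse_mdct_5

/-- Segment 5 of `inverse_mdct` (`cut5` … `loop5`): the seven steps chained. -/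
theorem Vorbis.Spec.Worked.inverse_mdct_5_ok : Vorbis.Spec.inverse_mdct_5.Statement := by
  intro Lay hLay μ hμ u₀ hcode h_ilog h_iter0 h_rloop others frames len A stored room ysz k c ue ret v hat
  -- `cut5` … `cut7`: ilog, the first iter0 call
  refine ReachVia.trans (Vorbis.Spec.inverse_mdct_5.step_cut7 hLay hμ hcode h_ilog h_iter0 hat) ?_
  intro s7 h7
  -- `cut7` … `cut8`: the second iter0 call
  refine ReachVia.trans (Vorbis.Spec.inverse_mdct_5.step_cut8 hLay hμ hcode h_iter0 h7) ?_
  intro s8 h8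
  -- `cut8` … `cut12`: the four r_loop calls
  refine ReachVia.trans (Vorbis.Spec.inverse_mdct_5.step_cut9 hLay hμ hcode h_rloop h8) ?_
  intro s9 h9
  refine ReachVia.trans (Vorbis.Spec.inverse_mdct_5.step_cut10 hLay hμ hcode h_rloop h9) ?_
  intro s10 h10
  refine ReachVia.trans (Vorbis.Spec.inverse_mdct_5.step_cut11 hLay hμ hcode h_rloop h10) ?_
  intro s11 h11
  refine ReachVia.trans (Vorbis.Spec.inverse_mdct_5.step_cut12 hLay hμ hcode h_rloop h11) ?_
  intro s12 h12
  -- `cut12` … `loop5`: `l = 2`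
  exact Vorbis.Spec.inverse_mdct_5.step_loop5 hLay hμ hcode h12
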